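-- pv_equiv track=rewrite | github.com/twalen/RankBorderedWords | src/rank_unrank/rank_ub.py | rankB
-- ===== SOURCE A (Python) =====
-- def power(k, n):
--     return k**n
--
-- def B(a: list[int], b: list[int], n: int, p: int, k: int) -> int:
--     saveB = [0] * (n + 1)
--     if n <= 2 * p:
--         total = 0
--         for i in range(1, n - p + 1):
--             total += a[i] * power(k, n - p - i)
--         for i in range(n - p + 1, n // 2 + 1):
--             total += a[i] * b[i - (n - p)]
--         return total
--     else:
--         for j in range(p, 2 * p + 1):
--             saveB[j] = B(a, b, j, p, k)
--         for j in range(2 * p + 1, n + 1):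
--             saveB[j] = 0
--             for i in range(1, p + 1):
--                 saveB[j] += a[i] * power(k, j - p - i)
--             for i in range(p + 1, j // 2 + 1):
--                 saveB[j] += (power(k, i - p) - saveB[i]) * power(k, j - 2 * i)
--         return saveB[n]
--
-- def populateBorderArrays(w: list[int], n: int):
--     PBA = [0] * (n + 1)
--     a = [0] * (n + 1)
--     b = [0] * (n + 1)
--
--     a[1] = 1
--     i = 2
--     length = 0
--     while i <= n:
--         if w[i] == w[length + 1]:
--             length += 1
--             PBA[i] = length
--             i += 1
--         else:
--             if length != 0:
--                 length = PBA[length]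
--             else:
--                 PBA[i] = 0
--                 i += 1
--         a[i - 1] = PBA[i - 1] == 0
--
--     i = n
--     while PBA[i] > 0:
--         b[PBA[i]] = 1
--         i = PBA[i]
--     return a, b
--
-- def rankB(w: list[int], n: int, k: int):
--     result = 0
--     for i in range(1, n + 1):
--         save = w[i]
--         for c in range(1, save):
--             w[i] = c
--             a, b = populateBorderArrays(w, i)
--             result += B(a, b, n, i, k)
--         w[i] = save
--     return result + 1
-- ===== SOURCE B (Python) =====
-- def populateBorderArrays(w: list[int], n: int):
--     PBA = [0] * (n + 1)
--     a = [0] * (n + 1)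
--     b = [0] * (n + 1)
--
--     a[1] = 1
--     i = 2
--     length = 0
--     while i <= n:
--         if w[i] == w[length + 1]:
--             length += 1
--             PBA[i] = length
--             i += 1
--         else:
--             if length != 0:
--                 length = PBA[length]
--             else:
--                 PBA[i] = 0
--                 i += 1
--         a[i - 1] = PBA[i - 1] == 0
--
--     i = n
--     while PBA[i] > 0:
--         b[PBA[i]] = 1
--         i = PBA[i]
--     return a, b
--
--
-- def _base(a, b, n, p, k):
--     total = 0
--     for i in range(1, n - p + 1):
--         total += a[i] * k ** (n - p - i)
--     for i in range(n - p + 1, n // 2 + 1):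
--         total += a[i] * b[i - (n - p)]
--     return total
--
--
-- def _countB(a, b, n, p, k):
--     # One forward pass with running accumulators instead of A's recursive
--     # helper's two nested scans per table entry:
--     #   A0 = fixed contribution of short (<= p) unbordered borders,
--     #   P  = k^(j-2p) maintained multiplicatively,
--     #   S  = the overlap convolution sum, maintained by S <- k*S (+ one new
--     #        term when j is even), using U[i] = #unbordered length-i extensions.
--     if n <= 2 * p:
--         return _base(a, b, n, p, k)
--     A0 = 0
--     for i in range(1, p + 1):
--         A0 += a[i] * k ** (p - i)
--     half = n // 2
--     U = [0] * (half + 1)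
--     for i in range(p + 1, min(2 * p, half) + 1):
--         U[i] = k ** (i - p) - _base(a, b, i, p, k)
--     Kp = k ** p
--     S = 0
--     P = 1
--     Bj = 0
--     for j in range(2 * p + 1, n + 1):
--         P *= k
--         S *= k
--         if j % 2 == 0:
--             S += U[j // 2]
--         Bj = A0 * P + S
--         if j <= half:
--             U[j] = P * Kp - Bj
--     return Bj
--
--
-- def rankB(w: list[int], n: int, k: int):
--     total = 1
--     for i in range(1, n + 1):
--         for c in range(1, w[i]):
--             v = list(w)
--             v[i] = c
--             a, b = populateBorderArrays(v, i)
--             total += _countB(a, b, n, i, k)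
--     return total
-- ===== Notes on version B (the rewrite author's own statement) =====
-- stated objective: alternative
-- what changed: A's recursive helper B, which fills each DP entry with two fresh inner scans (a power-sum over the prefix and a convolution over all earlier entries), is replaced by a single forward pass with running accumulators: the prefix contribution becomes one precomputed constant A0 times a multiplicatively-maintained power P = k^(j-2p), and the convolution is maintained incrementally as S <- k*S plus at most one new term per step, so the per-entry inner loops disappear; a timing run's big-integer arithmetic dominates, so no speed is claimed.
import Mathlib
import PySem

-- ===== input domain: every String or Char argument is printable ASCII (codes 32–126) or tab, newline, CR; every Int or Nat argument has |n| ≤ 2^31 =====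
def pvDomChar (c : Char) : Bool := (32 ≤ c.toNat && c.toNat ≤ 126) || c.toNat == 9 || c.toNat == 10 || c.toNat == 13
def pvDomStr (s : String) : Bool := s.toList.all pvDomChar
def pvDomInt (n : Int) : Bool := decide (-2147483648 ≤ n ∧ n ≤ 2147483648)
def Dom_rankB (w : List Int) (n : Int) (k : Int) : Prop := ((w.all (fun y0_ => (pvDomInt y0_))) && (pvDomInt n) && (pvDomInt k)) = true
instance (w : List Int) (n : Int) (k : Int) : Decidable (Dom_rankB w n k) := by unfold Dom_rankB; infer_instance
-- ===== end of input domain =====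

-- B replaces A's recursive helper B (two nested scans per table entry) by one forward pass
-- with running accumulators (P = k^(j-2p) kept multiplicatively, S = the overlap convolution
-- kept by S <- k*S plus one new term on even j); A mutates w but restores it, B copies —
-- equivalence is about the return value (objective: alternative decomposition).

-- Shared helpers.  Python subscripts: under Pre_ every subscript in either program is a
-- valid non-negative index, so `pyGetD _ _ 0` / `List.set i.toNat` are exact there.
def pvAt (xs : List Int) (i : Int) : Int := PySem.List.pyGetD xs i 0
def pvSet (xs : List Int) (i v : Int) : List Int := xs.set i.toNat v
def pvPow (k e : Int) : Int := k ^ e.toNat  -- k**e; every exponent reached is ≥ 0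

-- populateBorderArrays: identical in both Pythons, ported once and used by both ports.
-- The while loops are ported with fuel; 2n+4 (resp. n+2) strictly bounds the number of
-- iterations of the Python loop (the potential 2i-length grows each turn; the border
-- chain strictly descends), so the port is exact.
def pvPbaLoop (w : List Int) (n : Int) : Nat → Int → Int → List Int → List Int → List Int × List Int
  | 0, _, _, PBA, a => (PBA, a)
  | fuel+1, i, len, PBA, a =>
    if i ≤ n then
      let st :=
        if pvAt w i = pvAt w (len + 1) then
          (i + 1, len + 1, pvSet PBA i (len + 1))
        else if len ≠ 0 then
          (i, pvAt PBA len, PBA)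
        else
          (i + 1, len, pvSet PBA i 0)
      pvPbaLoop w n fuel st.1 st.2.1 st.2.2
        (pvSet a (st.1 - 1) (if pvAt st.2.2 (st.1 - 1) = 0 then 1 else 0))
    else (PBA, a)

def pvChainLoop (PBA : List Int) : Nat → Int → List Int → List Int
  | 0, _, b => b
  | fuel+1, i, b =>
    if pvAt PBA i > 0 then pvChainLoop PBA fuel (pvAt PBA i) (pvSet b (pvAt PBA i) 1) else b

def populateBA (w : List Int) (n : Int) : List Int × List Int :=
  let PBA0 := List.replicate (n + 1).toNat 0
  let a0 := pvSet (List.replicate (n + 1).toNat 0) 1 1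
  let b0 := List.replicate (n + 1).toNat 0
  let pa := pvPbaLoop w n (2 * n + 4).toNat 2 0 PBA0 a0
  (pa.2, pvChainLoop pa.1 (n.toNat + 2) n b0)

-- ===== PORT A =====
-- A's recursive B; recursion depth is 1 (inner calls satisfy j ≤ 2p), fuel n.toNat+2 is exact.
def pvB : Nat → List Int → List Int → Int → Int → Int → Int
  | 0, _, _, _, _, _ => 0
  | fuel+1, a, b, n, p, k =>
    let saveB := List.replicate (n + 1).toNat 0
    if n ≤ 2 * p then
      let t := (PySem.List.pyRange 1 (n - p + 1)).foldl
        (fun t i => t + pvAt a i * pvPow k (n - p - i)) 0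
      (PySem.List.pyRange (n - p + 1) (PySem.Int.floordiv n 2 + 1)).foldl
        (fun t i => t + pvAt a i * pvAt b (i - (n - p))) t
    else
      let s1 := (PySem.List.pyRange p (2 * p + 1)).foldl
        (fun s j => pvSet s j (pvB fuel a b j p k)) saveB
      let s2 := (PySem.List.pyRange (2 * p + 1) (n + 1)).foldl
        (fun s j =>
          let s := pvSet s j 0
          let s := (PySem.List.pyRange 1 (p + 1)).foldl
            (fun s i => pvSet s j (pvAt s j + pvAt a i * pvPow k (j - p - i))) s
          (PySem.List.pyRange (p + 1) (PySem.Int.floordiv j 2 + 1)).foldl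
            (fun s i => pvSet s j (pvAt s j + (pvPow k (i - p) - pvAt s i) * pvPow k (j - 2 * i))) s) s1
      pvAt s2 n

def rankB (w : List Int) (n : Int) (k : Int) : Int :=
  let st := (PySem.List.pyRange 1 (n + 1)).foldl
    (fun (st : List Int × Int) i =>
      let save := pvAt st.1 i
      let st2 := (PySem.List.pyRange 1 save).foldl
        (fun (st : List Int × Int) c =>
          let w' := pvSet st.1 i c
          let ab := populateBA w' i
          (w', st.2 + pvB (n.toNat + 2) ab.1 ab.2 n i k)) st
      (pvSet st2.1 i save, st2.2)) (w, 0)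
  st.2 + 1

-- ===== PORT B =====
def altBase (a b : List Int) (n p k : Int) : Int :=
  let t := (PySem.List.pyRange 1 (n - p + 1)).foldl
    (fun t i => t + pvAt a i * pvPow k (n - p - i)) 0
  (PySem.List.pyRange (n - p + 1) (PySem.Int.floordiv n 2 + 1)).foldl
    (fun t i => t + pvAt a i * pvAt b (i - (n - p))) t

def altA0 (a : List Int) (p k : Int) : Int :=
  (PySem.List.pyRange 1 (p + 1)).foldl (fun t i => t + pvAt a i * pvPow k (p - i)) 0

-- _countB from Source B: one forward pass, state (U, S, P, Bj)
def altCountB (a b : List Int) (n p k : Int) : Int :=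
  if n ≤ 2 * p then altBase a b n p k
  else
    let A0 := altA0 a p k
    let half := PySem.Int.floordiv n 2
    let U0 := (PySem.List.pyRange (p + 1) (min (2 * p) half + 1)).foldl
      (fun U i => pvSet U i (pvPow k (i - p) - altBase a b i p k))
      (List.replicate (half + 1).toNat 0)
    let Kp := pvPow k p
    let st := (PySem.List.pyRange (2 * p + 1) (n + 1)).foldl
      (fun (st : List Int × Int × Int × Int) j =>
        let P := st.2.2.1 * k
        let S0 := st.2.1 * k
        let S := if PySem.Int.mod j 2 = 0 then S0 + pvAt st.1 (PySem.Int.floordiv j 2) else S0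
        let Bj := A0 * P + S
        let U := if j ≤ half then pvSet st.1 j (P * Kp - Bj) else st.1
        (U, S, P, Bj)) (U0, 0, 1, 0)
    st.2.2.2

def rankB_alt (w : List Int) (n : Int) (k : Int) : Int :=
  (PySem.List.pyRange 1 (n + 1)).foldl
    (fun total i =>
      (PySem.List.pyRange 1 (pvAt w i)).foldl
        (fun total c =>
          let v := pvSet w i c
          let ab := populateBA v i
          total + altCountB ab.1 ab.2 n i k) total) 1

-- ===== PRECONDITION & SPEC =====
-- Pre_ excludes exactly the inputs where A raises IndexError: 1 ≤ n and len(w) ≤ n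
-- (then w[i] is evaluated for some i ≥ len(w)).
def Pre_rankB (w : List Int) (n : Int) (k : Int) : Prop := n ≤ 0 ∨ n < (w.length : Int)
instance (w : List Int) (n : Int) (k : Int) : Decidable (Pre_rankB w n k) := by
  unfold Pre_rankB; infer_instance

def pvWitness_rankB : List Int × Int × Int := ([0, 2, 1, 2], 3, 2)

def Spec_rankB (w : List Int) (n : Int) (k : Int) (out : Int) : Prop := out = rankB_alt w n k
instance (w : List Int) (n : Int) (k : Int) (out : Int) : Decidable (Spec_rankB w n k out) := by
  unfold Spec_rankB; infer_instance

-- ===== CLAIM (what is proved, stated in full; the proofs are below) =====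
def Claim_equal_rankB : Prop := ∀ (w : List Int) (n : Int) (k : Int), Dom_rankB w n k → Pre_rankB w n k → Spec_rankB w n k (rankB w n k)

-- ===== LEMMAS AND PROOFS =====

lemma pvAt_nonneg (xs : List Int) (i : Int) (h : 0 ≤ i) : pvAt xs i = xs.getD i.toNat 0 :=
  PySem.List.pyGetD_of_nonneg xs 0 h

lemma pvAt_set_self (s : List Int) (j v : Int) (hj : 0 ≤ j) (hlen : j.toNat < s.length) :
    pvAt (pvSet s j v) j = v := by
  simp [pvAt_nonneg _ _ hj, pvSet, List.getD, hlen]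

lemma pvAt_set_ne (s : List Int) (i j v : Int) (hi : 0 ≤ i) (hj : 0 ≤ j) (hne : i ≠ j) :
    pvAt (pvSet s j v) i = pvAt s i := by
  have : j.toNat ≠ i.toNat := by omega
  simp [pvAt_nonneg _ _ hi, pvSet, List.getD, List.getElem?_set_ne this]

lemma pvSet_set (s : List Int) (j x y : Int) : pvSet (pvSet s j x) j y = pvSet s j y :=
  List.set_set x

lemma pvSet_self (s : List Int) (i : Int) (hi : 0 ≤ i) (hlen : i.toNat < s.length) :
    pvSet s i (pvAt s i) = s := by
  simp [pvAt_nonneg _ _ hi, pvSet, List.getD, List.getElem?_eq_getElem hlen]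

lemma length_pvSet (s : List Int) (j v : Int) : (pvSet s j v).length = s.length := by
  simp [pvSet]

lemma pvPow_add (k x y : Int) (hx : 0 ≤ x) (hy : 0 ≤ y) :
    pvPow k (x + y) = pvPow k x * pvPow k y := by
  unfold pvPow
  rw [show (x + y).toNat = x.toNat + y.toNat by omega, pow_add]


lemma pvPow_one (k : Int) : pvPow k 1 = k := by
  unfold pvPow; norm_num

-- in-place accumulation into slot j = accumulate then store once
lemma inplace_fold (j : Int) (hj : 0 ≤ j) (f : List Int → Int → Int)
    (L : List Int) (hf : ∀ s v i, i ∈ L → f (pvSet s j v) i = f s i) :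
    ∀ s : List Int, j.toNat < s.length →
      L.foldl (fun s i => pvSet s j (pvAt s j + f s i)) s
        = pvSet s j (L.foldl (fun v i => v + f s i) (pvAt s j)) := by
  induction L with
  | nil => intro s hlen; exact (pvSet_self s j hj hlen).symm
  | cons i L ih =>
    intro s hlen
    simp only [List.foldl_cons]
    rw [ih (fun s v i hi => hf s v i (List.mem_cons_of_mem _ hi)) _
        (by rw [length_pvSet]; exact hlen)]
    rw [pvAt_set_self s j _ hj hlen, pvSet_set]
    congr 1
    exact PySem.List.foldl_congr_mem _ _ _ _
      (fun acc x hx => by rw [hf s _ x (List.mem_cons_of_mem _ hx)])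

-- one iteration of A's dp loop (j > 2p): in-place form = store-once form
lemma dp_step_eq (a : List Int) (n p k j : Int) (hp : 1 ≤ p) (hj1 : 2 * p + 1 ≤ j) (hjn : j ≤ n)
    (s : List Int) (hlen : s.length = (n + 1).toNat) :
    ((PySem.List.pyRange (p + 1) (PySem.Int.floordiv j 2 + 1)).foldl
        (fun s i => pvSet s j (pvAt s j + (pvPow k (i - p) - pvAt s i) * pvPow k (j - 2 * i)))
        ((PySem.List.pyRange 1 (p + 1)).foldl
          (fun s i => pvSet s j (pvAt s j + pvAt a i * pvPow k (j - p - i))) (pvSet s j 0)))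
      = pvSet s j ((PySem.List.pyRange (p + 1) (PySem.Int.floordiv j 2 + 1)).foldl
          (fun v i => v + (pvPow k (i - p) - pvAt s i) * pvPow k (j - 2 * i))
          ((PySem.List.pyRange 1 (p + 1)).foldl
            (fun v i => v + pvAt a i * pvPow k (j - p - i)) 0)) := by
  have hj0 : 0 ≤ j := by omega
  have hjt : j.toNat < s.length := by rw [hlen]; omega
  have hne : ∀ i : Int, i ∈ PySem.List.pyRange (p + 1) (PySem.Int.floordiv j 2 + 1) →
      0 ≤ i ∧ i ≠ j := by
    intro i hi
    rw [PySem.List.mem_pyRange_one] at hi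
    rw [PySem.Int.floordiv_eq_ediv_of_pos (by norm_num)] at hi
    constructor <;> omega
  rw [inplace_fold j hj0 (fun _ i => pvAt a i * pvPow k (j - p - i)) _
      (fun s v i _ => rfl) (pvSet s j 0) (by rw [length_pvSet]; exact hjt)]
  rw [pvAt_set_self s j 0 hj0 hjt, pvSet_set]
  rw [inplace_fold j hj0 (fun s i => (pvPow k (i - p) - pvAt s i) * pvPow k (j - 2 * i)) _
      (fun s v i hi => by
        simp only []
        rw [pvAt_set_ne s i j v (hne i hi).1 hj0 (hne i hi).2])
      _ (by rw [length_pvSet]; exact hjt)]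
  rw [pvAt_set_self s j _ hj0 hjt, pvSet_set]
  congr 1
  refine PySem.List.foldl_congr_mem _ _ _ _ (fun acc i hi => ?_)
  rw [pvAt_set_ne s i j _ (hne i hi).1 hj0 (hne i hi).2]

-- ---- reference table: the mathematical values of the saveB recurrence, built iteratively
def bVal (a b : List Int) (p k : Int) (prev : List Int) (j : Int) : Int :=
  if j ≤ 2 * p then altBase a b j p k
  else
    (PySem.List.pyRange (p + 1) (PySem.Int.floordiv j 2 + 1)).foldl
      (fun v i => v + (pvPow k (i - p) - pvAt prev i) * pvPow k (j - 2 * i))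
      ((PySem.List.pyRange 1 (p + 1)).foldl (fun v i => v + pvAt a i * pvPow k (j - p - i)) 0)

def bTabs (a b : List Int) (p k : Int) : Nat → List Int
  | 0 => []
  | j+1 => bTabs a b p k j ++ [bVal a b p k (bTabs a b p k j) (j : Int)]

def bTN (a b : List Int) (p k : Int) (j : Nat) : Int := (bTabs a b p k (j + 1)).getD j 0

def bTI (a b : List Int) (p k : Int) (j : Int) : Int := bTN a b p k j.toNat

lemma length_bTabs (a b : List Int) (p k : Int) : ∀ m, (bTabs a b p k m).length = m := by
  intro m
  induction m with
  | zero => rfl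
  | succ m ih => simp [bTabs, ih]

lemma getD_bTabs (a b : List Int) (p k : Int) :
    ∀ m j, j < m → (bTabs a b p k m).getD j 0 = bTN a b p k j := by
  intro m
  induction m with
  | zero => intro j h; omega
  | succ m ih =>
    intro j h
    by_cases hj : j < m
    · rw [bTabs, List.getD_append _ _ _ j (by rw [length_bTabs]; exact hj), ih j hj]
    · have hjm : j = m := by omega
      subst hjm
      rfl

lemma pvAt_bTabs (a b : List Int) (p k : Int) (m : Nat) (i : Int)
    (h0 : 0 ≤ i) (h : i < (m : Int)) :
    pvAt (bTabs a b p k m) i = bTI a b p k i := by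
  rw [pvAt_nonneg _ _ h0]
  exact getD_bTabs a b p k m i.toNat (by omega)

lemma bTN_eq (a b : List Int) (p k : Int) (j : Nat) :
    bTN a b p k j = bVal a b p k (bTabs a b p k j) (j : Int) := by
  unfold bTN
  rw [show j + 1 = j + 1 from rfl, bTabs,
      List.getD_append_right _ _ _ j (by rw [length_bTabs])]
  simp [length_bTabs]

lemma bTI_basecase (a b : List Int) (p k : Int) (j : Int) (h0 : 0 ≤ j) (hj : j ≤ 2 * p) :
    bTI a b p k j = altBase a b j p k := by
  rw [bTI, bTN_eq, Int.toNat_of_nonneg h0, bVal, if_pos hj]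

lemma bTI_step (a b : List Int) (p k : Int) (j : Int) (hj : 2 * p + 1 ≤ j) (hp : 1 ≤ p) :
    bTI a b p k j
      = (PySem.List.pyRange (p + 1) (PySem.Int.floordiv j 2 + 1)).foldl
          (fun v i => v + (pvPow k (i - p) - bTI a b p k i) * pvPow k (j - 2 * i))
          ((PySem.List.pyRange 1 (p + 1)).foldl (fun v i => v + pvAt a i * pvPow k (j - p - i)) 0) := by
  have h0 : 0 ≤ j := by omega
  rw [bTI, bTN_eq, Int.toNat_of_nonneg h0, bVal, if_neg (by omega)]
  refine PySem.List.foldl_congr_mem _ _ _ _ (fun acc i hi => ?_)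
  rw [PySem.List.mem_pyRange_one, PySem.Int.floordiv_eq_ediv_of_pos (by norm_num)] at hi
  rw [pvAt_bTabs a b p k j.toNat i (by omega) (by omega)]

-- ---- generic lemmas about folds that store g j at index j over an increasing range
lemma set_fold_len (g : Int → Int) :
    ∀ (js : List Int) (s : List Int),
      (js.foldl (fun s j => pvSet s j (g j)) s).length = s.length := by
  intro js
  induction js with
  | nil => intro s; rfl
  | cons j js ih => intro s; simp only [List.foldl_cons]; rw [ih, length_pvSet]

lemma set_fold_lo (g : Int → Int) :
    ∀ (fuel : Nat) (lo hi : Int), (hi - lo).toNat = fuel →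
      ∀ (s : List Int) (t : Int), 0 ≤ t → t < lo →
        pvAt ((PySem.List.pyRange lo hi).foldl (fun s j => pvSet s j (g j)) s) t = pvAt s t := by
  intro fuel
  induction fuel with
  | zero =>
    intro lo hi hf s t h0 ht
    rw [PySem.List.pyRange_one_eq_nil (show hi ≤ lo by omega)]
    rfl
  | succ f ih =>
    intro lo hi hf s t h0 ht
    rw [PySem.List.pyRange_one_cons (show lo < hi by omega)]
    simp only [List.foldl_cons]
    rw [ih (lo + 1) hi (by omega) _ t h0 (by omega)]
    exact pvAt_set_ne s t lo (g lo) h0 (by omega) (by omega)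

lemma set_fold_hit (g : Int → Int) :
    ∀ (fuel : Nat) (lo hi : Int), (hi - lo).toNat = fuel →
      ∀ (s : List Int) (t : Int), 0 ≤ lo → lo ≤ t → t < hi → t.toNat < s.length →
        pvAt ((PySem.List.pyRange lo hi).foldl (fun s j => pvSet s j (g j)) s) t = g t := by
  intro fuel
  induction fuel with
  | zero => intro lo hi hf s t _ h1 h2 _; omega
  | succ f ih =>
    intro lo hi hf s t hlo h1 h2 hlen
    rw [PySem.List.pyRange_one_cons (show lo < hi by omega)]
    simp only [List.foldl_cons]
    by_cases hel : lo = t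
    · subst hel
      rw [set_fold_lo g (hi - (lo + 1)).toNat (lo + 1) hi rfl _ lo (by omega) (by omega)]
      exact pvAt_set_self s lo (g lo) hlo hlen
    · rw [ih (lo + 1) hi (by omega) _ t (by omega) (by omega) h2
          (by rw [length_pvSet]; exact hlen)]

-- ---- A-side: the seg2 fold realises the reference table
lemma segA_inv (a b : List Int) (n p k : Int) (hp : 1 ≤ p) :
    ∀ (fuel : Nat) (jlo : Int), (n + 1 - jlo).toNat = fuel → 2 * p + 1 ≤ jlo →
      ∀ (s : List Int), s.length = (n + 1).toNat →
        (∀ t : Int, p ≤ t → t < jlo → pvAt s t = bTI a b p k t) →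
        ∀ t : Int, p ≤ t → t ≤ n →
          pvAt (((PySem.List.pyRange jlo (n + 1)).foldl
            (fun s j =>
              let s := pvSet s j 0
              let s := (PySem.List.pyRange 1 (p + 1)).foldl
                (fun s i => pvSet s j (pvAt s j + pvAt a i * pvPow k (j - p - i))) s
              (PySem.List.pyRange (p + 1) (PySem.Int.floordiv j 2 + 1)).foldl
                (fun s i => pvSet s j (pvAt s j + (pvPow k (i - p) - pvAt s i) * pvPow k (j - 2 * i))) s) s)) t
            = bTI a b p k t := by
  intro fuel
  induction fuel with
  | zero =>
    intro jlo hf hjlo s hlen hinv t htp htn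
    rw [PySem.List.pyRange_one_eq_nil (show n + 1 ≤ jlo by omega)]
    exact hinv t htp (by omega)
  | succ f ih =>
    intro jlo hf hjlo s hlen hinv t htp htn
    have hjn : jlo ≤ n := by omega
    rw [PySem.List.pyRange_one_cons (show jlo < n + 1 by omega)]
    simp only [List.foldl_cons]
    rw [dp_step_eq a n p k jlo hp hjlo hjn s hlen]
    have hval : ((PySem.List.pyRange (p + 1) (PySem.Int.floordiv jlo 2 + 1)).foldl
        (fun v i => v + (pvPow k (i - p) - pvAt s i) * pvPow k (jlo - 2 * i))
        ((PySem.List.pyRange 1 (p + 1)).foldl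
          (fun v i => v + pvAt a i * pvPow k (jlo - p - i)) 0)) = bTI a b p k jlo := by
      rw [bTI_step a b p k jlo hjlo hp]
      refine PySem.List.foldl_congr_mem _ _ _ _ (fun acc i hi => ?_)
      rw [PySem.List.mem_pyRange_one, PySem.Int.floordiv_eq_ediv_of_pos (by norm_num)] at hi
      rw [hinv i (by omega) (by omega)]
    rw [hval]
    exact ih (jlo + 1) (by omega) (by omega) _
      (by rw [length_pvSet]; exact hlen)
      (fun t' htp' htl' => by
        by_cases he : t' = jlo
        · subst he
          exact pvAt_set_self s t' _ (by omega) (by omega)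
        · rw [pvAt_set_ne s t' jlo _ (by omega) (by omega) he]
          exact hinv t' htp' (by omega))
      t htp htn

lemma pvB_succ_base (f : Nat) (a b : List Int) (n p k : Int) (h : n ≤ 2 * p) :
    pvB (f + 1) a b n p k = altBase a b n p k := by
  simp [pvB, altBase, h]

lemma pvB_eq_bTI (f : Nat) (a b : List Int) (n p k : Int) (hp : 1 ≤ p) (hn : 2 * p + 1 ≤ n) :
    pvB (f + 2) a b n p k = bTI a b p k n := by
  rw [show f + 2 = (f + 1) + 1 from rfl, pvB]
  rw [if_neg (by omega)]
  have hs1 : (PySem.List.pyRange p (2 * p + 1)).foldl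
      (fun s j => pvSet s j (pvB (f + 1) a b j p k)) (List.replicate (n + 1).toNat 0)
      = (PySem.List.pyRange p (2 * p + 1)).foldl
        (fun s j => pvSet s j (bTI a b p k j)) (List.replicate (n + 1).toNat 0) := by
    refine PySem.List.foldl_congr_mem _ _ _ _ (fun acc j hj => ?_)
    rw [PySem.List.mem_pyRange_one] at hj
    rw [pvB_succ_base f a b j p k (by omega), bTI_basecase a b p k j (by omega) (by omega)]
  rw [hs1]
  refine segA_inv a b n p k hp (n + 1 - (2 * p + 1)).toNat (2 * p + 1) rfl (by omega) _
    ?_ ?_ n (by omega) le_rfl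
  · rw [set_fold_len, List.length_replicate]
  · intro t htp htl
    rw [set_fold_hit (bTI a b p k) (2 * p + 1 - p).toNat p (2 * p + 1) rfl _ t
        (by omega) htp htl (by simp [List.length_replicate]; omega)]

-- ---- B-side: the running accumulators realise the same table
def sSum (a b : List Int) (p k j : Int) : Int :=
  ((PySem.List.pyRange (p + 1) (PySem.Int.floordiv j 2 + 1)).map
    (fun i => (pvPow k (i - p) - bTI a b p k i) * pvPow k (j - 2 * i))).sum

lemma bTI_accum (a b : List Int) (p k : Int) (j : Int) (hj : 2 * p + 1 ≤ j) (hp : 1 ≤ p) :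
    bTI a b p k j = altA0 a p k * pvPow k (j - 2 * p) + sSum a b p k j := by
  rw [bTI_step a b p k j hj hp, PySem.List.foldl_add, PySem.List.foldl_add]
  have hfirst : (0 + ((PySem.List.pyRange 1 (p + 1)).map
      (fun i => pvAt a i * pvPow k (j - p - i))).sum)
      = altA0 a p k * pvPow k (j - 2 * p) := by
    rw [zero_add, altA0, PySem.List.foldl_add, zero_add]
    rw [show ((PySem.List.pyRange 1 (p + 1)).map (fun i => pvAt a i * pvPow k (j - p - i)))
        = ((PySem.List.pyRange 1 (p + 1)).map
            (fun i => (pvAt a i * pvPow k (p - i)) * pvPow k (j - 2 * p))) from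
      List.map_congr_left (fun i hi => by
        rw [PySem.List.mem_pyRange_one] at hi
        rw [mul_assoc, ← pvPow_add k (p - i) (j - 2 * p) (by omega) (by omega)]
        congr 2
        omega)]
    rw [List.sum_map_mul_right]
  rw [hfirst, sSum]
-- end of first chunk

lemma pvPow_zero (k : Int) : pvPow k 0 = 1 := by unfold pvPow; norm_num

lemma pvPow_succ (k e : Int) (he : 0 ≤ e) : pvPow k (e + 1) = pvPow k e * k := by
  rw [pvPow_add k e 1 he (by norm_num), pvPow_one]

lemma sSum_step (a b : List Int) (p k j : Int) (hp : 1 ≤ p) (hj : 2 * p + 1 ≤ j) :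
    sSum a b p k j = sSum a b p k (j - 1) * k
      + (if PySem.Int.mod j 2 = 0
         then pvPow k (PySem.Int.floordiv j 2 - p) - bTI a b p k (PySem.Int.floordiv j 2)
         else 0) := by
  unfold sSum
  simp only [PySem.Int.floordiv_eq_ediv_of_pos (show (0:Int) < 2 by norm_num),
    PySem.Int.mod_eq_emod_of_pos (show (0:Int) < 2 by norm_num)]
  rcases Int.emod_two_eq j with he | ho
  · have hm : p + 1 ≤ j / 2 := by omega
    have hprev : (j - 1) / 2 = j / 2 - 1 := by omega
    rw [if_pos he, hprev, show j / 2 - 1 + 1 = j / 2 by ring]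
    rw [PySem.List.pyRange_one_succ_right (show p + 1 ≤ j / 2 from hm)]
    rw [List.map_append, List.sum_append]
    have hlast : ((([j / 2]).map
        (fun i => (pvPow k (i - p) - bTI a b p k i) * pvPow k (j - 2 * i))).sum)
        = pvPow k (j / 2 - p) - bTI a b p k (j / 2) := by
      simp [show j - 2 * (j / 2) = 0 by omega, pvPow_zero]
    rw [hlast]
    have hmain : ((PySem.List.pyRange (p + 1) (j / 2)).map
        (fun i => (pvPow k (i - p) - bTI a b p k i) * pvPow k (j - 2 * i)))
        = ((PySem.List.pyRange (p + 1) (j / 2)).map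
          (fun i => ((pvPow k (i - p) - bTI a b p k i) * pvPow k (j - 1 - 2 * i)) * k)) := by
      refine List.map_congr_left (fun i hi => ?_)
      rw [PySem.List.mem_pyRange_one] at hi
      rw [show j - 2 * i = (j - 1 - 2 * i) + 1 by ring,
        pvPow_succ k (j - 1 - 2 * i) (by omega), ← mul_assoc]
    rw [hmain, List.sum_map_mul_right]
  · have hprev : (j - 1) / 2 = j / 2 := by omega
    rw [if_neg (by omega), hprev, add_zero]
    have hmain : ((PySem.List.pyRange (p + 1) (j / 2 + 1)).map
        (fun i => (pvPow k (i - p) - bTI a b p k i) * pvPow k (j - 2 * i)))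
        = ((PySem.List.pyRange (p + 1) (j / 2 + 1)).map
          (fun i => ((pvPow k (i - p) - bTI a b p k i) * pvPow k (j - 1 - 2 * i)) * k)) := by
      refine List.map_congr_left (fun i hi => ?_)
      rw [PySem.List.mem_pyRange_one] at hi
      rw [show j - 2 * i = (j - 1 - 2 * i) + 1 by ring,
        pvPow_succ k (j - 1 - 2 * i) (by omega), ← mul_assoc]
    rw [hmain, List.sum_map_mul_right]

lemma altLoop (a b : List Int) (n p k A0 half Kp : Int) (hp : 1 ≤ p)
    (hA0 : A0 = altA0 a p k) (hhalf : half = PySem.Int.floordiv n 2) (hKp : Kp = pvPow k p) :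
    ∀ (fuel : Nat) (jprev : Int) (U : List Int) (S P Bj : Int),
      (n - jprev).toNat = fuel + 1 → 2 * p ≤ jprev →
      U.length = (half + 1).toNat →
      (∀ i : Int, p < i → i ≤ jprev → i ≤ half →
        pvAt U i = pvPow k (i - p) - bTI a b p k i) →
      S = sSum a b p k jprev → P = pvPow k (jprev - 2 * p) →
      ((PySem.List.pyRange (jprev + 1) (n + 1)).foldl
        (fun (st : List Int × Int × Int × Int) j =>
          let P := st.2.2.1 * k
          let S0 := st.2.1 * k
          let S := if PySem.Int.mod j 2 = 0 then S0 + pvAt st.1 (PySem.Int.floordiv j 2) else S0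
          let Bj := A0 * P + S
          let U := if j ≤ half then pvSet st.1 j (P * Kp - Bj) else st.1
          (U, S, P, Bj)) (U, S, P, Bj)).2.2.2 = bTI a b p k n := by
  have hhalf' : half = n / 2 := by
    rw [hhalf, PySem.Int.floordiv_eq_ediv_of_pos (by norm_num)]
  intro fuel
  induction fuel with
  | zero =>
    intro jprev U S P Bj hf hjp hUlen hU hS hP
    have hjn : jprev + 1 = n := by omega
    rw [PySem.List.pyRange_one_cons (show jprev + 1 < n + 1 by omega), List.foldl_cons,
      PySem.List.pyRange_one_eq_nil (show n + 1 ≤ jprev + 1 + 1 by omega), List.foldl_nil]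
    show A0 * (P * k)
        + (if PySem.Int.mod (jprev + 1) 2 = 0
           then S * k + pvAt U (PySem.Int.floordiv (jprev + 1) 2) else S * k)
        = bTI a b p k n
    have hP' : P * k = pvPow k (jprev + 1 - 2 * p) := by
      rw [hP, show jprev + 1 - 2 * p = (jprev - 2 * p) + 1 by ring,
        pvPow_add k (jprev - 2 * p) 1 (by omega) (by norm_num), pvPow_one]
    have hS' : (if PySem.Int.mod (jprev + 1) 2 = 0
        then S * k + pvAt U (PySem.Int.floordiv (jprev + 1) 2) else S * k)
        = sSum a b p k (jprev + 1) := by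
      rw [sSum_step a b p k (jprev + 1) hp (by omega), show jprev + 1 - 1 = jprev by ring, ← hS]
      by_cases hev : PySem.Int.mod (jprev + 1) 2 = 0
      · rw [if_pos hev, if_pos hev]
        rw [PySem.Int.mod_eq_emod_of_pos (show (0:Int) < 2 by norm_num)] at hev
        rw [PySem.Int.floordiv_eq_ediv_of_pos (show (0:Int) < 2 by norm_num)]
        rw [hU ((jprev + 1) / 2) (by omega) (by omega) (by omega)]
      · rw [if_neg hev, if_neg hev, add_zero]
    rw [hP', hS', ← hjn, bTI_accum a b p k (jprev + 1) (by omega) hp, hA0]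
  | succ f ih =>
    intro jprev U S P Bj hf hjp hUlen hU hS hP
    rw [PySem.List.pyRange_one_cons (show jprev + 1 < n + 1 by omega), List.foldl_cons]
    have hP' : P * k = pvPow k (jprev + 1 - 2 * p) := by
      rw [hP, show jprev + 1 - 2 * p = (jprev - 2 * p) + 1 by ring,
        pvPow_add k (jprev - 2 * p) 1 (by omega) (by norm_num), pvPow_one]
    have hS' : (if PySem.Int.mod (jprev + 1) 2 = 0
        then S * k + pvAt U (PySem.Int.floordiv (jprev + 1) 2) else S * k)
        = sSum a b p k (jprev + 1) := by
      rw [sSum_step a b p k (jprev + 1) hp (by omega), show jprev + 1 - 1 = jprev by ring, ← hS]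
      by_cases hev : PySem.Int.mod (jprev + 1) 2 = 0
      · rw [if_pos hev, if_pos hev]
        rw [PySem.Int.mod_eq_emod_of_pos (show (0:Int) < 2 by norm_num)] at hev
        rw [PySem.Int.floordiv_eq_ediv_of_pos (show (0:Int) < 2 by norm_num)]
        rw [hU ((jprev + 1) / 2) (by omega) (by omega) (by omega)]
      · rw [if_neg hev, if_neg hev, add_zero]
    have hB' : A0 * (P * k)
        + (if PySem.Int.mod (jprev + 1) 2 = 0
           then S * k + pvAt U (PySem.Int.floordiv (jprev + 1) 2) else S * k)
        = bTI a b p k (jprev + 1) := by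
      rw [hP', hS', bTI_accum a b p k (jprev + 1) (by omega) hp, hA0]
    show ((PySem.List.pyRange (jprev + 1 + 1) (n + 1)).foldl
        (fun (st : List Int × Int × Int × Int) j =>
          let P := st.2.2.1 * k
          let S0 := st.2.1 * k
          let S := if PySem.Int.mod j 2 = 0 then S0 + pvAt st.1 (PySem.Int.floordiv j 2) else S0
          let Bj := A0 * P + S
          let U := if j ≤ half then pvSet st.1 j (P * Kp - Bj) else st.1
          (U, S, P, Bj))
        ((if jprev + 1 ≤ half then
            pvSet U (jprev + 1) (P * k * Kp - (A0 * (P * k) +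
              (if PySem.Int.mod (jprev + 1) 2 = 0
               then S * k + pvAt U (PySem.Int.floordiv (jprev + 1) 2) else S * k)))
          else U),
         (if PySem.Int.mod (jprev + 1) 2 = 0
          then S * k + pvAt U (PySem.Int.floordiv (jprev + 1) 2) else S * k),
         P * k,
         A0 * (P * k) + (if PySem.Int.mod (jprev + 1) 2 = 0
           then S * k + pvAt U (PySem.Int.floordiv (jprev + 1) 2) else S * k))).2.2.2
        = bTI a b p k n
    refine ih (jprev + 1) _ _ _ _ (by omega) (by omega) ?_ ?_ hS' hP'
    · show (if jprev + 1 ≤ half then pvSet U (jprev + 1) _ else U).length = (half + 1).toNat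
      split
      · rw [length_pvSet]; exact hUlen
      · exact hUlen
    · intro i hip hile hihalf
      show pvAt (if jprev + 1 ≤ half then pvSet U (jprev + 1) _ else U) i = _
      by_cases hi : i = jprev + 1
      · rw [hi, if_pos (by omega : jprev + 1 ≤ half)]
        rw [pvAt_set_self U (jprev + 1) _ (by omega) (by rw [hUlen]; omega)]
        rw [hB', hP', hKp,
          ← pvPow_add k (jprev + 1 - 2 * p) p (by omega) (by omega),
          show jprev + 1 - 2 * p + p = jprev + 1 - p by ring]
      · have : pvAt (if jprev + 1 ≤ half then pvSet U (jprev + 1)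
            ((P * k) * Kp - (A0 * (P * k)
              + (if PySem.Int.mod (jprev + 1) 2 = 0
                 then S * k + pvAt U (PySem.Int.floordiv (jprev + 1) 2) else S * k))) else U) i
            = pvAt U i := by
          split
          · exact pvAt_set_ne U i (jprev + 1) _ (by omega) (by omega) hi
          · rfl
        rw [this, hU i hip (by omega) hihalf]

lemma alt_eq_bTI (a b : List Int) (n p k : Int) (hp : 1 ≤ p) (hn : 2 * p + 1 ≤ n) :
    altCountB a b n p k = bTI a b p k n := by
  have hhalf : PySem.Int.floordiv n 2 = n / 2 :=
    PySem.Int.floordiv_eq_ediv_of_pos (by norm_num)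
  unfold altCountB
  rw [if_neg (by omega)]
  rw [show (2 * p + 1 : Int) = 2 * p + 1 from rfl]
  refine altLoop a b n p k (altA0 a p k) (PySem.Int.floordiv n 2) (pvPow k p) hp rfl rfl rfl
    ((n - 2 * p).toNat - 1) (2 * p) _ 0 1 0 (by omega) le_rfl ?_ ?_ ?_ ?_
  · rw [set_fold_len, List.length_replicate]
  · intro i hip hile hihalf
    rw [set_fold_hit (fun i => pvPow k (i - p) - altBase a b i p k)
        (min (2 * p) (PySem.Int.floordiv n 2) + 1 - (p + 1)).toNat (p + 1)
        (min (2 * p) (PySem.Int.floordiv n 2) + 1) rfl _ i (by omega) (by omega)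
        (by rw [hhalf] at hihalf ⊢; omega)
        (by rw [List.length_replicate, hhalf] at *; omega)]
    rw [bTI_basecase a b p k i (by omega) (by omega)]
  · unfold sSum
    rw [PySem.Int.floordiv_eq_ediv_of_pos (show (0:Int) < 2 by norm_num),
      show 2 * p / 2 = p by omega,
      PySem.List.pyRange_one_eq_nil (show p + 1 ≤ p + 1 from le_rfl)]
    rfl
  · rw [show 2 * p - 2 * p = (0 : Int) by ring, pvPow_zero]

lemma pvB_eq_altCountB (f : Nat) (a b : List Int) (n p k : Int) (hp : 1 ≤ p) :
    pvB (f + 2) a b n p k = altCountB a b n p k := by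
  by_cases h : n ≤ 2 * p
  · rw [show f + 2 = (f + 1) + 1 from rfl, pvB_succ_base (f + 1) a b n p k h]
    unfold altCountB
    rw [if_pos h]
  · rw [pvB_eq_bTI f a b n p k hp (by omega), alt_eq_bTI a b n p k hp (by omega)]

-- ---- outer loop of rankB: w is restored after each inner loop, totals agree
lemma inner_fold_eq (i n k : Int) (cs : List Int) :
    ∀ (w : List Int) (r : Int),
      cs.foldl (fun (st : List Int × Int) c =>
          let w' := pvSet st.1 i c
          let ab := populateBA w' i
          (w', st.2 + pvB (n.toNat + 2) ab.1 ab.2 n i k)) (w, r)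
        = (cs.foldl (fun wa c => pvSet wa i c) w,
           cs.foldl (fun r c =>
             r + pvB (n.toNat + 2) (populateBA (pvSet w i c) i).1 (populateBA (pvSet w i c) i).2 n i k) r) := by
  induction cs with
  | nil => intro w r; rfl
  | cons c cs ih =>
    intro w r
    simp only [List.foldl_cons]
    rw [ih]
    simp only [pvSet_set]

lemma set_chain_restore (i : Int) (hi : 0 ≤ i) :
    ∀ (cs : List Int) (w : List Int), i.toNat < w.length →
      pvSet (cs.foldl (fun wa c => pvSet wa i c) w) i (pvAt w i) = w := by
  have aux : ∀ (cs : List Int) (w : List Int) (c v : Int),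
      pvSet (cs.foldl (fun wa c => pvSet wa i c) (pvSet w i c)) i v = pvSet w i v := by
    intro cs
    induction cs with
    | nil => intro w c v; exact pvSet_set w i c v
    | cons c' cs ih =>
      intro w c v
      simp only [List.foldl_cons, pvSet_set]
      exact ih w c' v
  intro cs w hlen
  cases cs with
  | nil => exact pvSet_self w i hi hlen
  | cons c cs =>
    simp only [List.foldl_cons]
    rw [aux cs w c (pvAt w i)]
    exact pvSet_self w i hi hlen

lemma foldl_add_init (L : List Int) (T : Int → Int) :
    ∀ x y : Int, L.foldl (fun a c => a + T c) (x + y) = L.foldl (fun a c => a + T c) x + y := by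
  induction L with
  | nil => intro x y; simp
  | cons c L ih => intro x y; simp only [List.foldl_cons]; rw [add_right_comm, ih]

lemma outer_fold_eq (n k : Int) (w : List Int) :
    ∀ (is : List Int) (r : Int), (∀ i ∈ is, 1 ≤ i ∧ i < (w.length : Int)) →
      is.foldl (fun (st : List Int × Int) i =>
          let save := pvAt st.1 i
          let st2 := (PySem.List.pyRange 1 save).foldl
            (fun (st : List Int × Int) c =>
              let w' := pvSet st.1 i c
              let ab := populateBA w' i
              (w', st.2 + pvB (n.toNat + 2) ab.1 ab.2 n i k)) st
          (pvSet st2.1 i save, st2.2)) (w, r)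
        = (w, is.foldl (fun total i =>
            (PySem.List.pyRange 1 (pvAt w i)).foldl
              (fun total c =>
                let v := pvSet w i c
                let ab := populateBA v i
                total + altCountB ab.1 ab.2 n i k) total) (r + 1) - 1) := by
  intro is
  induction is with
  | nil => intro r _; simp
  | cons i is ih =>
    intro r hmem
    obtain ⟨hi1, hilen⟩ := hmem i (List.mem_cons_self ..)
    have hi0 : 0 ≤ i := by omega
    have hitn : i.toNat < w.length := by omega
    simp only [List.foldl_cons]
    rw [inner_fold_eq i n k (PySem.List.pyRange 1 (pvAt w i)) w r]
    rw [set_chain_restore i hi0 (PySem.List.pyRange 1 (pvAt w i)) w hitn]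
    rw [ih _ (fun j hj => hmem j (List.mem_cons_of_mem _ hj))]
    have hT : List.foldl (fun r c => r + pvB (n.toNat + 2) (populateBA (pvSet w i c) i).1
          (populateBA (pvSet w i c) i).2 n i k) r (PySem.List.pyRange 1 (pvAt w i))
        = List.foldl (fun total c => total + altCountB (populateBA (pvSet w i c) i).1
          (populateBA (pvSet w i c) i).2 n i k) r (PySem.List.pyRange 1 (pvAt w i)) :=
      PySem.List.foldl_congr_mem _ _ _ _
        (fun acc c _ => by
          rw [pvB_eq_altCountB n.toNat (populateBA (pvSet w i c) i).1
            (populateBA (pvSet w i c) i).2 n i k hi1])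
    rw [hT, foldl_add_init (PySem.List.pyRange 1 (pvAt w i)) _ r 1]

-- ===== VERDICT (by name: the statement is the Claim_ definition above) =====
theorem rankB_spec : Claim_equal_rankB := by
  intro w n k _hDom hPre
  unfold Spec_rankB rankB rankB_alt
  have hmem : ∀ i ∈ PySem.List.pyRange 1 (n + 1), 1 ≤ i ∧ i < (w.length : Int) := by
    intro i hi
    rw [PySem.List.mem_pyRange_one] at hi
    rcases hPre with h | h
    · exfalso; omega
    · exact ⟨hi.1, by omega⟩
  rw [outer_fold_eq n k w _ 0 hmem]
  norm_num
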